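-- pv_equiv track=rewrite | github.com/git-jh/west-ost | statistik.py | class_counter
-- ===== SOURCE A (Python) =====
-- def class_counter(listDelta ):
--     ''' Kurze Statistik
--     Es folgt eine kurze Auswertung der Daten. Eine Ausführliche Darstellung der Ergebnisse folgt in einem gesonderten Programm (4.).
--     Die Auflösung der Orientierung erfolgt zunächst mit einer Genauigkeit von einem Grad.
--     Eine Reduzierung der Auflösung ist durch Zusammenfassen mehrere Klassen, zum Beispiel für eine Auflösung von 5 Grad, möglich.
--     -> Liefert Haufigkeit in den Intervallen 0, +-5, +-10
--     Parameter:
--         listDelta - List der Differenzen zwischen Labels und Prognose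
--     Return:
--         countEqual      - Anzahl der 0-Differenzen
--         countEqual_u5   - Anzahl der Werte im Vertrauensbereich +-5
--         countEqual_u10  - Anzahl der Werte im Vertrauensbereich +-10 '''
--     countEqual=0
--     countEqual_u5=0
--     countEqual_u10=0
--     for delta in listDelta:
--         if delta == 0: countEqual +=1 # zur Kontrolle
--         if abs(delta) <=5:   countEqual_u5+=1
--         if abs(delta) <=10: countEqual_u10+=1
--     return countEqual, countEqual_u5, countEqual_u10
-- ===== SOURCE B (Python) =====
-- def class_counter(listDelta):
--     # Build a frequency histogram first, then aggregate over distinct values.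
--     freq = {}
--     for delta in listDelta:
--         freq[delta] = freq.get(delta, 0) + 1
--     countEqual = freq.get(0, 0)
--     countEqual_u5 = sum(c for k, c in freq.items() if abs(k) <= 5)
--     countEqual_u10 = sum(c for k, c in freq.items() if abs(k) <= 10)
--     return countEqual, countEqual_u5, countEqual_u10
-- ===== Notes on version B (the rewrite author's own statement) =====
-- stated objective: alternative
-- what changed: Replaced A's single element-wise pass with three per-element if-checks by building a frequency histogram (dict of value counts) and then computing each of the three totals by aggregating over the distinct values.
import Mathlib
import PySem

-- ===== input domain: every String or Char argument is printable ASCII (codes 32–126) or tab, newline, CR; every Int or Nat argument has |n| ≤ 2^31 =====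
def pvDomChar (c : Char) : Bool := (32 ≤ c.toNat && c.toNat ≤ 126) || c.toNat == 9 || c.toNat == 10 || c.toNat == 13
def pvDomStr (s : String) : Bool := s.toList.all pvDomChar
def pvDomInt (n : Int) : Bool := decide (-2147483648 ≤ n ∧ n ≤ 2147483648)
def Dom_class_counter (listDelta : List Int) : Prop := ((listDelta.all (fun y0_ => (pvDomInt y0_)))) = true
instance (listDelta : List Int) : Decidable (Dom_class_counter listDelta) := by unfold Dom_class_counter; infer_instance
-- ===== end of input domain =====

-- B builds a frequency histogram first and aggregates over distinct values instead of A's per-element if-checks (alternative shape, same cost).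


-- ===== PORT A =====
def class_counter (listDelta : List Int) : Int × Int × Int :=
  listDelta.foldl
    (fun acc delta =>
      let countEqual := if delta == 0 then acc.1 + 1 else acc.1
      let countEqual_u5 := if |delta| ≤ 5 then acc.2.1 + 1 else acc.2.1
      let countEqual_u10 := if |delta| ≤ 10 then acc.2.2 + 1 else acc.2.2
      (countEqual, countEqual_u5, countEqual_u10))
    (0, 0, 0)

-- ===== PORT B =====
def class_counter_alt (listDelta : List Int) : Int × Int × Int :=
  let freq : PySem.Dict Int Int :=
    listDelta.foldl (fun d delta => d.insert delta (d.getD delta 0 + 1)) PySem.Dict.empty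
  let countEqual := freq.getD 0 0
  let countEqual_u5 := ((freq.items.filter (fun p => |p.1| ≤ 5)).map (·.2)).sum
  let countEqual_u10 := ((freq.items.filter (fun p => |p.1| ≤ 10)).map (·.2)).sum
  (countEqual, countEqual_u5, countEqual_u10)

-- ===== PRECONDITION & SPEC =====
def Spec_class_counter (listDelta : List Int) (out : Int × Int × Int) : Prop := out = class_counter_alt listDelta
instance (listDelta : List Int) (out : Int × Int × Int) : Decidable (Spec_class_counter listDelta out) := by unfold Spec_class_counter; infer_instance

-- ===== CLAIM (what is proved, stated in full; the proofs are below) =====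
def Claim_equal_class_counter : Prop := ∀ (listDelta : List Int), Dom_class_counter listDelta → Spec_class_counter listDelta (class_counter listDelta)

-- ===== LEMMAS AND PROOFS =====

-- A's loop, characterised: each component counts the matching elements.
theorem classCounterA_loop (xs : List Int) (a b c : Int) :
    xs.foldl
      (fun acc delta =>
        let countEqual := if delta == 0 then acc.1 + 1 else acc.1
        let countEqual_u5 := if |delta| ≤ 5 then acc.2.1 + 1 else acc.2.1
        let countEqual_u10 := if |delta| ≤ 10 then acc.2.2 + 1 else acc.2.2
        (countEqual, countEqual_u5, countEqual_u10))
      (a, b, c)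
    = (a + xs.count 0, b + (xs.countP (fun x => |x| ≤ 5) : Int),
       c + (xs.countP (fun x => |x| ≤ 10) : Int)) := by
  induction xs generalizing a b c with
  | nil => simp
  | cons x t ih =>
    simp only [List.foldl_cons, List.count_cons, List.countP_cons, ih]
    by_cases h0 : x = 0 <;> by_cases h5 : |x| ≤ (5 : Int) <;> by_cases h10 : |x| ≤ (10 : Int) <;>
      simp_all <;> constructor <;> try constructor
    all_goals omega

-- summing the histogram over the distinct values with |k| ≤ bound counts the matching elements
theorem sum_count_set_filter (xs : List Int) (p : Int → Bool) :
    (((PySem.Set.ofList xs).filter p).map (fun k => (xs.count k : Int))).sum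
      = (xs.countP p : Int) := by
  have hperm : (PySem.Set.ofList xs).Perm xs.dedup := by
    rw [List.perm_ext_iff_of_nodup (PySem.Set.nodup_ofList xs) xs.nodup_dedup]
    intro a; rw [PySem.Set.mem_ofList, List.mem_dedup]
  have hs := ((hperm.filter p).map (fun k => (xs.count k : Int))).sum_eq
  have h2 : (xs.dedup.filter p).map (fun k => ((xs.count k : ℕ) : Int))
      = List.map (Nat.cast : ℕ → Int) ((xs.dedup.filter p).map (fun k => xs.count k)) := by
    rw [List.map_map]; rfl
  rw [hs, h2, ← Nat.cast_list_sum]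
  exact congrArg _ (List.sum_map_count_dedup_filter_eq_countP p xs)

-- ===== VERDICT (by name: the statement is the Claim_ definition above) =====
theorem class_counter_spec : Claim_equal_class_counter := by
  intro xs _
  unfold Spec_class_counter class_counter class_counter_alt
  rw [classCounterA_loop]
  rw [PySem.Dict.foldl_insert_getD_add_one_eq_counter]
  simp only [PySem.Dict.getD_counter, PySem.Dict.items_counter]
  rw [List.filter_map, List.filter_map, List.map_map, List.map_map]
  simp only [Function.comp_def]
  rw [sum_count_set_filter, sum_count_set_filter]
  simp
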